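-- pv_equiv track=rewrite | github.com/aschenkuttel/dsbot | utils/misc.py | unpack_join
-- ===== SOURCE A (Python) =====
-- def unpack_join(record):
--     rows = []
--     tmp_row = {}
--     for key, value in record.items():
--         if key in tmp_row:
--             rows.append(tmp_row.copy())
--             tmp_row.clear()
--
--         tmp_row[key] = value
--
--     if tmp_row:
--         rows.append(tmp_row)
--
--     return rows
-- ===== SOURCE B (Python) =====
-- def unpack_join(record):
--     # dict keys are unique, so the split-at-repeated-key case never occurs:
--     # the result is a single copied row, or no rows for an empty dict.
--     return [dict(record)] if record else []
-- ===== Notes on version B (the rewrite author's own statement) =====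
-- stated objective: simpler
-- what changed: B drops A's whole accumulate-and-split loop: since dict keys are unique the 'key already seen' branch is unreachable, so B directly returns [dict(record)] (a fresh copy) or [] for an empty dict.
import Mathlib
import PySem

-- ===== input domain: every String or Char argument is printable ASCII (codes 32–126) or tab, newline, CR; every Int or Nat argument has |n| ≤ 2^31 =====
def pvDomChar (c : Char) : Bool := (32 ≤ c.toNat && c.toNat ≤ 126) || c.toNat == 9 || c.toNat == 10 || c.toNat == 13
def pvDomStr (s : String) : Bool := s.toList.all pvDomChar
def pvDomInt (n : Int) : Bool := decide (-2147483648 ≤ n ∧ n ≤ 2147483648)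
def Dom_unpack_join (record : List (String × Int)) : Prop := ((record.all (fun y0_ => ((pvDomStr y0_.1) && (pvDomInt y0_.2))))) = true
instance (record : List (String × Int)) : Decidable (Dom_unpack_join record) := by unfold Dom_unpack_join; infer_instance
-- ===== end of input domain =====

-- B replaces A's accumulate-and-split loop (unreachable on unique dict keys) by a direct
-- "[copy of record] or []"; objective: simpler. Equal return values on all inputs.

-- ===== PORT A =====
-- loop body: 'if key in tmp_row: rows.append(tmp_row.copy()); tmp_row.clear()' then 'tmp_row[key] = value'
def unpackStep (st : List (List (String × Int)) × PySem.Dict String Int) (kv : String × Int) :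
    List (List (String × Int)) × PySem.Dict String Int :=
  let (rows, tmp) := st
  if tmp.contains kv.1 then
    (rows ++ [tmp.items], (PySem.Dict.empty).insert kv.1 kv.2)
  else
    (rows, tmp.insert kv.1 kv.2)

def unpack_join (record : List (String × Int)) : List (List (String × Int)) :=
  let d := PySem.Dict.ofList record          -- the Python argument is a dict
  let st := d.items.foldl unpackStep ([], PySem.Dict.empty)
  if st.2.items.isEmpty then st.1 else st.1 ++ [st.2.items]

-- ===== PORT B =====
def unpack_join_alt (record : List (String × Int)) : List (List (String × Int)) :=
  let d := PySem.Dict.ofList record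
  if d.items.isEmpty then [] else [d.items]

-- ===== PRECONDITION & SPEC =====
def Spec_unpack_join (record : List (String × Int)) (out : List (List (String × Int))) : Prop := out = unpack_join_alt record
instance (record : List (String × Int)) (out : List (List (String × Int))) : Decidable (Spec_unpack_join record out) := by unfold Spec_unpack_join; infer_instance

-- ===== CLAIM (what is proved, stated in full; the proofs are below) =====
def Claim_equal_unpack_join : Prop := ∀ (record : List (String × Int)), Dom_unpack_join record → Spec_unpack_join record (unpack_join record)

-- ===== LEMMAS AND PROOFS =====

-- On a list of pairs with pairwise-distinct keys, all fresh for tmp, A's loop never takes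
-- the split branch: rows is unchanged and tmp just accumulates inserts.
theorem unpack_loop_eq (l : List (String × Int)) :
    ∀ (rows : List (List (String × Int))) (tmp : PySem.Dict String Int),
    (∀ a ∈ l, tmp.contains a.1 = false) → (l.map Prod.fst).Nodup →
    l.foldl unpackStep (rows, tmp) = (rows, l.foldl (fun d p => d.insert p.1 p.2) tmp) := by
  induction l with
  | nil => intro rows tmp _ _; rfl
  | cons kv t ih =>
    intro rows tmp hfresh hnd
    have hkv : tmp.contains kv.1 = false := hfresh kv (by simp)
    simp only [List.foldl_cons, unpackStep, hkv, if_neg (by exact Bool.false_ne_true)]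
    apply ih
    · intro a ha
      have hne : a.1 ≠ kv.1 := by
        simp only [List.map_cons, List.nodup_cons] at hnd
        intro h
        exact hnd.1 (h ▸ List.mem_map_of_mem ha)
      rw [PySem.Dict.contains_insert]
      simp [hne, hfresh a (List.mem_cons_of_mem _ ha)]
    · simp only [List.map_cons, List.nodup_cons] at hnd
      exact hnd.2

-- ===== VERDICT (by name: the statement is the Claim_ definition above) =====
theorem unpack_join_spec : Claim_equal_unpack_join := by
  intro record _
  unfold Spec_unpack_join unpack_join unpack_join_alt
  set d := PySem.Dict.ofList record with hd
  have hnd : (d.items.map Prod.fst).Nodup := PySem.Dict.nodup_keys_ofList record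
  have hloop := unpack_loop_eq d.items [] PySem.Dict.empty
      (fun a _ => PySem.Dict.contains_empty a.1) hnd
  have hitems : (d.items.foldl (fun (dd : PySem.Dict String Int) p => dd.insert p.1 p.2)
      PySem.Dict.empty).items = d.items := by
    rw [PySem.Dict.items_foldl_insert_fresh d.items Prod.fst Prod.snd PySem.Dict.empty
        (fun a _ => PySem.Dict.contains_empty a.1) hnd]
    simp [PySem.Dict.empty]
  simp only [hloop, hitems]
  split <;> simp
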